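-- pv_equiv track=rewrite | github.com/nassuphis/lyapunov | lyapunov_cli.py | _decode_sequence_token
-- ===== SOURCE A (Python) =====
-- DEFAULT_SEQ      = "AB"
--
-- def _decode_sequence_token(tok: str, default_seq: str = DEFAULT_SEQ) -> str:
--     """
--     Decode a sequence token into a string of 'A' and 'B'.
--
--     Supported syntax:
--
--         ABBA        -> ABBA
--         A5B5        -> AAAAA BBBBB
--         AB3A2       -> A B B B A A
--         (AB)40      -> AB repeated 40 times
--         A2(BA)3B    -> AA BABABA B
--     """
--     s = tok.strip()
--     if len(s) >= 2 and s[0] == s[-1] and s[0] in ("'", '"'):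
--         s = s[1:-1]
--     if not s:
--         return default_seq
--
--     out_parts = []
--     i = 0
--     n = len(s)
--
--     while i < n:
--         ch = s[i]
--
--         # Single letter A/B with optional count
--         if ch in "AaBb":
--             letter = ch.upper()
--             i += 1
--             j = i
--             while j < n and s[j].isdigit():
--                 j += 1
--             if j == i:
--                 count = 1
--             else:
--                 try:
--                     count = int(s[i:j])
--                 except Exception:
--                     return default_seq
--                 if count < 0:
--                     return default_seq
--             out_parts.append(letter * count)
--             i = j
--             continue
--
--         # Parenthesised group (AB...) with optional count: (AB)40
--         if ch == "(":
--             j = s.find(")", i + 1)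
--             if j == -1:
--                 return default_seq
--             group_str = s[i + 1 : j]
--             if not group_str:
--                 return default_seq
--             if any(c not in "AaBb" for c in group_str):
--                 return default_seq
--             group = "".join(c.upper() for c in group_str)
--
--             k = j + 1
--             while k < n and s[k].isdigit():
--                 k += 1
--             if k == j + 1:
--                 count = 1
--             else:
--                 try:
--                     count = int(s[j + 1 : k])
--                 except Exception:
--                     return default_seq
--                 if count < 0:
--                     return default_seq
--
--             out_parts.append(group * count)
--             i = k
--             continue
--
--         # Anything else -> fall back to default
--         return default_seq
--
--     seq = "".join(out_parts)
--     return seq or default_seq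
-- ===== SOURCE B (Python) =====
-- DEFAULT_SEQ = "AB"
--
-- def _decode_sequence_token(tok: str, default_seq: str = DEFAULT_SEQ) -> str:
--     # One-pass character state machine: deferred emission of the pending unit,
--     # instead of index jumping with lookahead scans.
--     s = tok.strip()
--     if len(s) >= 2 and s[0] == s[-1] and s[0] in "'\"":
--         s = s[1:-1]
--     if not s:
--         return default_seq
--
--     parts = []
--     pending = None   # unit (already uppercased) awaiting its count
--     count = None     # None: no digits seen yet (means 1)
--     group = None     # letter buffer while inside (...), else None
--
--     for ch in s:
--         if group is not None:
--             if ch == ")":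
--                 if not group:
--                     return default_seq
--                 pending, count, group = group, None, None
--             elif ch in "AaBb":
--                 group += ch.upper()
--             else:
--                 return default_seq
--         elif ch in "AaBb":
--             if pending is not None:
--                 parts.append(pending * (1 if count is None else count))
--             pending, count = ch.upper(), None
--         elif "0" <= ch <= "9":
--             if pending is None:
--                 return default_seq
--             count = (0 if count is None else count) * 10 + (ord(ch) - 48)
--         elif ch == "(":
--             if pending is not None:
--                 parts.append(pending * (1 if count is None else count))
--             pending, count, group = None, None, ""
--         else:
--             return default_seq
--
--     if group is not None:
--         return default_seq
--     if pending is not None: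
--         parts.append(pending * (1 if count is None else count))
--     return "".join(parts) or default_seq
-- ===== Notes on version B (the rewrite author's own statement) =====
-- stated objective: alternative
-- what changed: Replaces A's index-jumping scanner (lookahead digit scans, s.find for the closing paren, slicing) with a single left-to-right character state machine that buffers the pending unit/digits/group and emits each piece when the next unit starts.
import Mathlib
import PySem

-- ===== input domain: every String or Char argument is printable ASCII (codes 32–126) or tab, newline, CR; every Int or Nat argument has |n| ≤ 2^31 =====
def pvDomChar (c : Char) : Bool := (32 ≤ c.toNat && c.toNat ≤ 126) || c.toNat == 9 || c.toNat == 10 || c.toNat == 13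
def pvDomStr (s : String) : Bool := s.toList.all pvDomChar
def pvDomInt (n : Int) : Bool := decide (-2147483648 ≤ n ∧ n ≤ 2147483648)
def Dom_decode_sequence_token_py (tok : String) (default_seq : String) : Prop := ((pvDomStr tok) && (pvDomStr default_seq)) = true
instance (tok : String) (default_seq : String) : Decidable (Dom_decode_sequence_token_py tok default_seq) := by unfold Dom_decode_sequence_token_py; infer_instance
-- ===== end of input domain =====

-- B is a one-pass character state machine (deferred emission of the pending unit) replacing
-- A's index-jumping scanner with lookahead digit scans and s.find; objective: alternative.

-- `ch in "AaBb"` (both Pythons test this char class)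
def pvIsAB (c : Char) : Bool := c == 'A' || c == 'a' || c == 'B' || c == 'b'

-- ===== PORT A =====
-- the while-loop of A; `fuel` only makes the recursion structural (i grows by ≥ 1 each
-- iteration, so fuel = len(s) is never exhausted); `none` = "return default_seq"
def pvLoopA (s : List Char) : Nat → Nat → List (List Char) → Option (List (List Char))
  | 0, _, _ => none
  | fuel + 1, i, parts =>
    if i < s.length then
      let ch := s.getD i ' '
      if pvIsAB ch then
        -- digit scan  j = i+1; while j < n and s[j].isdigit(): j += 1
        let j := i + 1 + ((s.drop (i + 1)).takeWhile PySem.Chars.isdigit).length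
        let countO : Option Int :=
          if j = i + 1 then some 1
          else PySem.Int.ofChars? (PySem.List.slice s (some ((i : Int) + 1)) (some (j : Int)))
        match countO with
        | none => none                    -- `except: return default_seq`
        | some c =>
          if c < 0 then none              -- `if count < 0: return default_seq`
          else pvLoopA s fuel j (parts ++ [List.replicate c.toNat (PySem.Chars.upperChar ch)])
      else if ch = '(' then
        let jI := PySem.Chars.findFrom s [')'] ((i : Int) + 1) none
        if jI = -1 then none
        else
          let j := jI.toNat
          let grp := PySem.List.slice s (some ((i : Int) + 1)) (some (j : Int))
          if grp = [] then none
          else if grp.any (fun c => !pvIsAB c) then none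
          else
            let group := PySem.Chars.upper grp
            let k := j + 1 + ((s.drop (j + 1)).takeWhile PySem.Chars.isdigit).length
            let countO : Option Int :=
              if k = j + 1 then some 1
              else PySem.Int.ofChars? (PySem.List.slice s (some ((j : Int) + 1)) (some (k : Int)))
            match countO with
            | none => none
            | some c =>
              if c < 0 then none
              else pvLoopA s fuel k (parts ++ [(List.replicate c.toNat group).flatten])
      else none                           -- anything else -> default
    else some parts

def decode_sequence_token_py (tok : String) (default_seq : String) : String :=
  let s0 := PySem.Chars.strip tok.toList
  let s :=
    if 2 ≤ s0.length ∧ PySem.List.pyGet? s0 0 = PySem.List.pyGet? s0 (-1) ∧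
        (PySem.List.pyGet? s0 0 = some '\'' ∨ PySem.List.pyGet? s0 0 = some '"')
    then PySem.List.slice s0 (some 1) (some (-1)) else s0
  if s = [] then default_seq
  else
    match pvLoopA s (s.length + 1) 0 [] with
    | none => default_seq
    | some parts =>
      let seq := parts.flatten
      if seq = [] then default_seq else String.mk seq

-- ===== PORT B =====
-- machine state: emitted pieces, pending unit awaiting its count, its digit buffer,
-- and the letter buffer while inside (...)
structure PvStB where
  parts   : List (List Char)
  pending : Option (List Char)
  digits  : List Char
  group   : Option (List Char)
deriving Repr, DecidableEq

-- `parts.append(pending * (int(digits) if digits else 1))`; the `none` arm of int() is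
-- unreachable: digits is always a nonempty run of ASCII digits there, int() cannot raise
def pvFlushB (parts : List (List Char)) (pending : Option (List Char)) (ds : List Char) :
    Option (List (List Char)) :=
  match pending with
  | none => some parts
  | some u =>
    match (if ds = [] then some 1 else PySem.Int.ofChars? ds) with
    | none => none
    | some c => some (parts ++ [(List.replicate c.toNat u).flatten])

-- one character of B's loop; `none` = "return default_seq"
def pvStepB (st : PvStB) (ch : Char) : Option PvStB :=
  match st.group with
  | some g =>
    if ch = ')' then
      if g = [] then none
      else some ⟨st.parts, some g, [], none⟩
    else if pvIsAB ch then some ⟨st.parts, st.pending, st.digits, some (g ++ [PySem.Chars.upperChar ch])⟩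
    else none
  | none =>
    if pvIsAB ch then
      match pvFlushB st.parts st.pending st.digits with
      | none => none
      | some parts' => some ⟨parts', some [PySem.Chars.upperChar ch], [], none⟩
    else if '0' ≤ ch ∧ ch ≤ '9' then
      match st.pending with
      | none => none
      | some u => some ⟨st.parts, some u, st.digits ++ [ch], none⟩
    else if ch = '(' then
      match pvFlushB st.parts st.pending st.digits with
      | none => none
      | some parts' => some ⟨parts', none, [], some []⟩
    else none

def pvRunB : List Char → PvStB → Option PvStB
  | [], st => some st
  | c :: rest, st =>
    match pvStepB st c with
    | none => none
    | some st' => pvRunB rest st'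

def decode_sequence_token_py_alt (tok : String) (default_seq : String) : String :=
  let s0 := PySem.Chars.strip tok.toList
  let s :=
    if 2 ≤ s0.length ∧ PySem.List.pyGet? s0 0 = PySem.List.pyGet? s0 (-1) ∧
        (PySem.List.pyGet? s0 0 = some '\'' ∨ PySem.List.pyGet? s0 0 = some '"')
    then PySem.List.slice s0 (some 1) (some (-1)) else s0
  if s = [] then default_seq
  else
    match pvRunB s ⟨[], none, [], none⟩ with
    | none => default_seq
    | some st =>
      if st.group.isSome then default_seq
      else
        match pvFlushB st.parts st.pending st.digits with
        | none => default_seq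
        | some parts =>
          let seq := parts.flatten
          if seq = [] then default_seq else String.mk seq

-- ===== PRECONDITION & SPEC =====
def Spec_decode_sequence_token_py (tok : String) (default_seq : String) (out : String) : Prop := out = decode_sequence_token_py_alt tok default_seq
instance (tok : String) (default_seq : String) (out : String) : Decidable (Spec_decode_sequence_token_py tok default_seq out) := by unfold Spec_decode_sequence_token_py; infer_instance

-- ===== CLAIM (what is proved, stated in full; the proofs are below) =====
def Claim_equal_decode_sequence_token_py : Prop := ∀ (tok : String) (default_seq : String), Dom_decode_sequence_token_py tok default_seq → Spec_decode_sequence_token_py tok default_seq (decode_sequence_token_py tok default_seq)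

-- ===== LEMMAS AND PROOFS =====

-- the result of B's loop, folded to what the tail of B's function does with it
def pvOutB (r : Option PvStB) : Option (List (List Char)) :=
  match r with
  | none => none
  | some st => if st.group.isSome then none else pvFlushB st.parts st.pending st.digits

-- character-class facts
theorem pv_digit_bounds {c : Char} (h : PySem.Chars.isdigit c = true) :
    48 ≤ c.toNat ∧ c.toNat ≤ 57 := by
  simp [PySem.Chars.isdigit, Char.le_def] at h; exact h

theorem pv_digit_prop {c : Char} (h : PySem.Chars.isdigit c = true) : '0' ≤ c ∧ c ≤ '9' := by
  simpa [PySem.Chars.isdigit] using h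

theorem pvIsAB_false_of_digit {c : Char} (h : PySem.Chars.isdigit c = true) :
    pvIsAB c = false := by
  have := pv_digit_bounds h
  simp only [pvIsAB, Bool.or_eq_false_iff, beq_eq_false_iff_ne, ne_eq]
  refine ⟨⟨⟨?_, ?_⟩, ?_⟩, ?_⟩ <;> rintro rfl <;> simp_all

theorem pv_digit_notIntSpace {c : Char} (h : PySem.Chars.isdigit c = true) :
    PySem.Int.isIntSpace c = false := by
  have := pv_digit_bounds h
  simp only [PySem.Int.isIntSpace, Bool.or_eq_false_iff, decide_eq_false_iff_not]
  refine ⟨⟨⟨⟨⟨?_, ?_⟩, ?_⟩, ?_⟩, ?_⟩, ?_⟩ <;> rintro rfl <;> simp_all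

-- int() of a nonempty ASCII digit run returns a nonnegative value
theorem pvOfChars_digits_nonneg {ds : List Char} (hne : ds ≠ [])
    (hd : ∀ c ∈ ds, PySem.Chars.isdigit c = true) {z : Int}
    (h : PySem.Int.ofChars? ds = some z) : 0 ≤ z := by
  unfold PySem.Int.ofChars? at h
  have h1 : ds.dropWhile PySem.Int.isIntSpace = ds := by
    cases ds with
    | nil => rfl
    | cons a l => simp [pv_digit_notIntSpace (hd a (by simp))]
  have h2 : ds.reverse.dropWhile PySem.Int.isIntSpace = ds.reverse := by
    cases hr : ds.reverse with
    | nil => rfl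
    | cons a l =>
      have ha : a ∈ ds := by
        have : a ∈ ds.reverse := by rw [hr]; simp
        simpa using this
      simp [pv_digit_notIntSpace (hd a ha)]
  rw [h1, h2, List.reverse_reverse] at h
  dsimp only at h
  cases hds : ds with
  | nil => simp_all
  | cons a l =>
    subst hds
    have ha := pv_digit_bounds (hd a (by simp))
    split at h
    · rename_i ds' heq
      rw [List.cons.injEq] at heq
      obtain ⟨rfl, -⟩ := heq; simp at ha
    · rename_i ds' heq
      rw [List.cons.injEq] at heq
      obtain ⟨rfl, -⟩ := heq; simp at ha
    · simp only [Option.map_eq_some_iff, bind, Option.bind_eq_some_iff, pure] at h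
      obtain ⟨w, ⟨a2, -, h3⟩, rfl⟩ := h
      injection h3 with h3
      omega

theorem pvDropWhile_eq_drop (p : Char → Bool) (l : List Char) :
    l.dropWhile p = l.drop (l.takeWhile p).length := by
  induction l with
  | nil => rfl
  | cons a t ih =>
    by_cases h : p a = true
    · simpa [List.dropWhile_cons, List.takeWhile_cons, h] using ih
    · simp [Bool.eq_false_iff.mpr h]

theorem pvHead_dropWhile (p : Char → Bool) (l : List Char) (hd : Char)
    (h : (l.dropWhile p).head? = some hd) : p hd = false := by
  induction l with
  | nil => simp at h
  | cons a t ih =>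
    by_cases ha : p a = true
    · rw [List.dropWhile_cons_of_pos ha] at h; exact ih h
    · rw [List.dropWhile_cons_of_neg ha] at h
      simp at h
      subst h
      exact Bool.eq_false_iff.mpr ha

theorem pvSingletonPrefix (x : Char) (t : List Char) : [x] <+: t ↔ t.head? = some x := by
  cases t <;> simp [List.cons_prefix_cons, eq_comm]

-- L1: a run of digits in pending state only extends the digit buffer
theorem pvRunB_digits (ds : List Char) (hd : ∀ c ∈ ds, PySem.Chars.isdigit c = true)
    (rest : List Char) (parts : List (List Char)) (u ds0 : List Char) :
    pvRunB (ds ++ rest) ⟨parts, some u, ds0, none⟩ =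
      pvRunB rest ⟨parts, some u, ds0 ++ ds, none⟩ := by
  induction ds generalizing ds0 with
  | nil => simp
  | cons c cs ih =>
    have hc : PySem.Chars.isdigit c = true := hd c (by simp)
    rw [List.cons_append]
    show (match pvStepB ⟨parts, some u, ds0, none⟩ c with
          | none => none
          | some st' => pvRunB (cs ++ rest) st') = _
    rw [show pvStepB ⟨parts, some u, ds0, none⟩ c = some ⟨parts, some u, ds0 ++ [c], none⟩ by
      simp [pvStepB, pvIsAB_false_of_digit hc, pv_digit_prop hc]]
    dsimp only
    rw [ih (fun c h => hd c (by simp [h])) (ds0 ++ [c])]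
    simp

-- L2: at the end or before a non-digit, the pending unit may be flushed eagerly
theorem pvRunB_flush (rest : List Char)
    (hh : ∀ hd, rest.head? = some hd → PySem.Chars.isdigit hd = false)
    (parts : List (List Char)) (u ds : List Char) :
    pvOutB (pvRunB rest ⟨parts, some u, ds, none⟩) =
      match pvFlushB parts (some u) ds with
      | none => none
      | some parts' => pvOutB (pvRunB rest ⟨parts', none, [], none⟩) := by
  cases rest with
  | nil =>
    cases hfl : pvFlushB parts (some u) ds with
    | none => simp [pvRunB, pvOutB, pvFlushB] at hfl ⊢; split at hfl <;> simp_all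
    | some parts' => simp [pvRunB, pvOutB, hfl]; rfl
  | cons c rest' =>
    have hcd : PySem.Chars.isdigit c = false := hh c rfl
    have hcd' : ¬ ('0' ≤ c ∧ c ≤ '9') := by
      intro hcc
      rw [show PySem.Chars.isdigit c = true by simpa [PySem.Chars.isdigit] using hcc] at hcd
      exact absurd hcd (by simp)
    show pvOutB (match pvStepB ⟨parts, some u, ds, none⟩ c with
          | none => none
          | some st' => pvRunB rest' st') = _
    by_cases hab : pvIsAB c = true
    · rw [show pvStepB ⟨parts, some u, ds, none⟩ c =
          (match pvFlushB parts (some u) ds with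
           | none => none
           | some parts' => some ⟨parts', some [PySem.Chars.upperChar c], [], none⟩) by
        simp [pvStepB, hab]]
      cases hfl : pvFlushB parts (some u) ds with
      | none => simp [pvOutB]
      | some parts' =>
        show pvOutB (pvRunB rest' ⟨parts', some [PySem.Chars.upperChar c], [], none⟩) = _
        show _ = pvOutB (match pvStepB ⟨parts', none, [], none⟩ c with
          | none => none
          | some st' => pvRunB rest' st')
        rw [show pvStepB ⟨parts', none, [], none⟩ c =
            some ⟨parts', some [PySem.Chars.upperChar c], [], none⟩ by
          simp [pvStepB, hab, pvFlushB]]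
    · by_cases hpar : c = '('
      · subst hpar
        rw [show pvStepB ⟨parts, some u, ds, none⟩ '(' =
            (match pvFlushB parts (some u) ds with
             | none => none
             | some parts' => some ⟨parts', none, [], some []⟩) by
          simp [pvStepB, pvIsAB]]
        cases hfl : pvFlushB parts (some u) ds with
        | none => simp [pvOutB]
        | some parts' =>
          show pvOutB (pvRunB rest' ⟨parts', none, [], some []⟩) = _
          show _ = pvOutB (match pvStepB ⟨parts', none, [], none⟩ '(' with
            | none => none
            | some st' => pvRunB rest' st')
          rw [show pvStepB ⟨parts', none, [], none⟩ '(' = some ⟨parts', none, [], some []⟩ by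
            simp [pvStepB, pvIsAB, pvFlushB]]
      · rw [show pvStepB ⟨parts, some u, ds, none⟩ c = none by
          simp [pvStepB, hab, hcd', hpar]]
        cases hfl : pvFlushB parts (some u) ds with
        | none => simp [pvOutB]
        | some parts' =>
          show (none : Option (List (List Char))) = _
          show _ = pvOutB (match pvStepB ⟨parts', none, [], none⟩ c with
            | none => none
            | some st' => pvRunB rest' st')
          rw [show pvStepB ⟨parts', none, [], none⟩ c = none by
            simp [pvStepB, hab, hpar]]
          simp [pvOutB]

-- L3a: an unclosed group fails
theorem pvRunB_group_unclosed (rest : List Char) (h : ')' ∉ rest)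
    (parts : List (List Char)) (g : List Char) :
    pvOutB (pvRunB rest ⟨parts, none, [], some g⟩) = none := by
  induction rest generalizing g with
  | nil => simp [pvRunB, pvOutB]
  | cons c rest' ih =>
    have hc : c ≠ ')' := fun hc => h (by simp [hc])
    show pvOutB (match pvStepB ⟨parts, none, [], some g⟩ c with
          | none => none
          | some st' => pvRunB rest' st') = _
    by_cases hab : pvIsAB c = true
    · rw [show pvStepB ⟨parts, none, [], some g⟩ c =
          some ⟨parts, none, [], some (g ++ [PySem.Chars.upperChar c])⟩ by
        simp [pvStepB, hc, hab]]
      dsimp only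
      exact ih (fun hm => h (by simp [hm])) _
    · rw [show pvStepB ⟨parts, none, [], some g⟩ c = none by simp [pvStepB, hc, hab]]
      simp [pvOutB]

-- L3b: a closed group collects its letters (or fails on a bad letter / empty group)
theorem pvRunB_group (gs : List Char) (h : ')' ∉ gs) (g : List Char)
    (parts : List (List Char)) (rest : List Char) :
    pvRunB (gs ++ ')' :: rest) ⟨parts, none, [], some g⟩ =
      if gs.any (fun c => !pvIsAB c) then none
      else if g = [] ∧ gs = [] then none
      else pvRunB rest ⟨parts, some (g ++ PySem.Chars.upper gs), [], none⟩ := by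
  induction gs generalizing g with
  | nil =>
    show (match pvStepB ⟨parts, none, [], some g⟩ ')' with
          | none => none
          | some st' => pvRunB rest st') = _
    by_cases hg : g = []
    · subst hg
      rw [show pvStepB ⟨parts, none, [], some []⟩ ')' = none by simp [pvStepB]]
      simp
    · rw [show pvStepB ⟨parts, none, [], some g⟩ ')' = some ⟨parts, some g, [], none⟩ by
        simp [pvStepB, hg]]
      simp [hg, PySem.Chars.upper]
  | cons c gs' ih =>
    have hc : c ≠ ')' := fun hc => h (by simp [hc])
    rw [List.cons_append]
    show (match pvStepB ⟨parts, none, [], some g⟩ c with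
          | none => none
          | some st' => pvRunB (gs' ++ ')' :: rest) st') = _
    by_cases hab : pvIsAB c = true
    · rw [show pvStepB ⟨parts, none, [], some g⟩ c =
          some ⟨parts, none, [], some (g ++ [PySem.Chars.upperChar c])⟩ by
        simp [pvStepB, hc, hab]]
      dsimp only
      rw [ih (fun hm => h (by simp [hm])) (g ++ [PySem.Chars.upperChar c])]
      simp [hab, PySem.Chars.upper]
    · rw [show pvStepB ⟨parts, none, [], some g⟩ c = none by simp [pvStepB, hc, hab]]
      simp [hab]

-- the shared "optional count then recurse" phase after a letter or a closed group
theorem pvDigitsPhase (s : List Char) (fuel pos : Nat) (parts : List (List Char)) (u : List Char)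
    (hpos : pos ≤ s.length)
    (ih : ∀ i' parts', i' ≤ s.length → s.length < i' + fuel →
        pvLoopA s fuel i' parts' = pvOutB (pvRunB (s.drop i') ⟨parts', none, [], none⟩))
    (hfuel : s.length < pos + fuel) :
    (match (if pos + ((s.drop pos).takeWhile PySem.Chars.isdigit).length = pos then some (1 : Int)
            else PySem.Int.ofChars? (PySem.List.slice s (some ((pos : Nat) : Int))
                   (some ((pos + ((s.drop pos).takeWhile PySem.Chars.isdigit).length : Nat) : Int)))) with
     | none => none
     | some c =>
       if c < 0 then none
       else pvLoopA s fuel (pos + ((s.drop pos).takeWhile PySem.Chars.isdigit).length)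
              (parts ++ [(List.replicate c.toNat u).flatten])) =
    pvOutB (pvRunB (s.drop pos) ⟨parts, some u, [], none⟩) := by
  set run := (s.drop pos).takeWhile PySem.Chars.isdigit with hrun
  have hrd : ∀ c ∈ run, PySem.Chars.isdigit c = true := fun c hc => List.mem_takeWhile_imp hc
  have hrest : (s.drop pos).dropWhile PySem.Chars.isdigit = s.drop (pos + run.length) := by
    rw [pvDropWhile_eq_drop, ← hrun, ← List.drop_drop]
  have hrunlen : run.length ≤ s.length - pos := by
    have h1 := (List.takeWhile_sublist (p := PySem.Chars.isdigit) (l := s.drop pos)).length_le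
    rw [← hrun, List.length_drop] at h1
    omega
  have hslice : PySem.List.slice s (some ((pos : Nat) : Int)) (some ((pos + run.length : Nat) : Int)) = run := by
    rw [PySem.List.slice_natCast]
    rw [Nat.add_sub_cancel_left]
    conv_lhs => rw [show s.drop pos = run ++ (s.drop pos).dropWhile PySem.Chars.isdigit from
      (List.takeWhile_append_dropWhile).symm]
    exact List.take_left' rfl
  conv_rhs => rw [show s.drop pos = run ++ (s.drop pos).dropWhile PySem.Chars.isdigit from
      (List.takeWhile_append_dropWhile).symm]
  rw [pvRunB_digits run hrd _ parts u [], List.nil_append, hrest]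
  rw [pvRunB_flush _ (fun hd h => pvHead_dropWhile PySem.Chars.isdigit (s.drop pos) hd (by rwa [hrest]))]
  by_cases hempty : run = []
  · have hcond : pos + run.length = pos := by simp [hempty]
    rw [if_pos hcond, hcond]
    rw [show pvFlushB parts (some u) run = some (parts ++ [(List.replicate (1 : Int).toNat u).flatten]) by
      simp [pvFlushB, hempty]]
    dsimp only
    rw [if_neg (by norm_num)]
    exact ih pos _ hpos hfuel
  · have hne : pos + run.length ≠ pos := by
      have : run.length ≠ 0 := fun h => hempty (List.length_eq_zero_iff.mp h)
      omega
    rw [if_neg hne, hslice]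
    rw [show pvFlushB parts (some u) run =
        (match PySem.Int.ofChars? run with
         | none => none
         | some c => some (parts ++ [(List.replicate c.toNat u).flatten])) by
      simp [pvFlushB, hempty]]
    cases hoc : PySem.Int.ofChars? run with
    | none => rfl
    | some c =>
      have hc0 : 0 ≤ c := pvOfChars_digits_nonneg hempty hrd hoc
      dsimp only
      rw [if_neg (by omega)]
      exact ih (pos + run.length) _ (by omega) (by omega)

-- main invariant: A's loop from position i equals B's machine on the suffix, clean state
theorem pvMain (s : List Char) (fuel i : Nat) (parts : List (List Char))
    (hi : i ≤ s.length) (hfuel : s.length < i + fuel) :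
    pvLoopA s fuel i parts = pvOutB (pvRunB (s.drop i) ⟨parts, none, [], none⟩) := by
  induction fuel generalizing i parts with
  | zero => omega
  | succ fuel ih =>
    by_cases h : i < s.length
    · have hdrop : s.drop i = s[i] :: s.drop (i + 1) := List.drop_eq_getElem_cons h
      rw [pvLoopA, if_pos h, List.getD_eq_getElem s ' ' h]
      by_cases hab : pvIsAB s[i] = true
      · rw [if_pos hab]
        conv_rhs => rw [hdrop]
        rw [show pvRunB (s[i] :: s.drop (i + 1)) ⟨parts, none, [], none⟩ =
            pvRunB (s.drop (i + 1)) ⟨parts, some [PySem.Chars.upperChar s[i]], [], none⟩ by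
          show (match pvStepB ⟨parts, none, [], none⟩ s[i] with
                | none => none | some st' => pvRunB (s.drop (i + 1)) st') = _
          rw [show pvStepB ⟨parts, none, [], none⟩ s[i] =
              some ⟨parts, some [PySem.Chars.upperChar s[i]], [], none⟩ by
            simp [pvStepB, hab, pvFlushB]]]
        rw [show ((i : Int) + 1) = ((i + 1 : Nat) : Int) by push_cast; ring]
        have hph := pvDigitsPhase s fuel (i + 1) parts [PySem.Chars.upperChar s[i]]
          (by omega) ih (by omega)
        simp only [show ∀ (n : Nat) (x : Char), (List.replicate n [x]).flatten = List.replicate n x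
          from fun n x => by simp] at hph
        exact hph
      · rw [if_neg hab]
        by_cases hpar : s[i] = '('
        · rw [if_pos hpar]
          conv_rhs => rw [hdrop]
          rw [hpar]
          rw [show pvRunB ('(' :: s.drop (i + 1)) ⟨parts, none, [], none⟩ =
              pvRunB (s.drop (i + 1)) ⟨parts, none, [], some []⟩ by
            show (match pvStepB ⟨parts, none, [], none⟩ '(' with
                  | none => none | some st' => pvRunB (s.drop (i + 1)) st') = _
            rw [show pvStepB ⟨parts, none, [], none⟩ '(' = some ⟨parts, none, [], some []⟩ by
              simp [pvStepB, pvIsAB, pvFlushB]]]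
          rw [show ((i : Int) + 1) = ((i + 1 : Nat) : Int) by push_cast; ring]
          rw [PySem.Chars.findFrom_natCast s [')'] (i + 1) (by omega)]
          by_cases hf : PySem.Chars.find (s.drop (i + 1)) [')'] = -1
          · rw [hf, if_pos rfl, if_pos rfl]
            have hnin : ')' ∉ s.drop (i + 1) := by
              have := (PySem.Chars.find_eq_neg_one_iff (s.drop (i + 1)) [')']).mp hf
              simpa [List.singleton_infix_iff] using this
            exact (pvRunB_group_unclosed _ hnin parts []).symm
          · rw [if_neg hf]
            have hge : 0 ≤ PySem.Chars.find (s.drop (i + 1)) [')'] := by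
              have := PySem.Chars.neg_one_le_find (s.drop (i + 1)) [')']
              omega
            obtain ⟨hpre, hmin⟩ := PySem.Chars.find_spec (s := s.drop (i + 1)) (sub := [')']) hge
            set l := s.drop (i + 1) with hl
            set k := (PySem.Chars.find l [')']).toNat with hk
            have hfind : PySem.Chars.find l [')'] = (k : Int) := by omega
            have hkl : k < l.length := by
              by_contra hcon
              rw [List.drop_eq_nil_of_le (by omega)] at hpre
              simp at hpre
            have hdropk : l.drop k = ')' :: l.drop (k + 1) := by
              have h1 := List.drop_eq_getElem_cons hkl
              have h2 : l[k] = ')' := by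
                have h3 := (pvSingletonPrefix ')' (l.drop k)).mp hpre
                exact (List.getElem_eq_iff hkl).mpr (by rw [h1] at h3; simpa using h3)
              rw [h1, h2]
            have hgsnotin : ')' ∉ l.take k := by
              intro hm
              obtain ⟨m, hmlt, hme⟩ := List.mem_iff_getElem.mp hm
              have hmk : m < k := by
                have := hmlt; simp [List.length_take] at this; omega
              have hmll : m < l.length := by omega
              apply hmin m hmk
              rw [pvSingletonPrefix, List.drop_eq_getElem_cons hmll]
              simp only [List.head?_cons, Option.some.injEq]
              rw [← List.getElem_take (h := hmlt)]  -- (l.take k)[m] = l[m]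
              exact hme
            have hsplit : l = l.take k ++ ')' :: l.drop (k + 1) := by
              conv_lhs => rw [← List.take_append_drop k l, hdropk]
            rw [hfind]
            rw [if_neg (show ¬ (((i + 1 : Nat) : Int) + (k : Int) = -1) by push_cast; omega)]
            rw [show ((i + 1 : Nat) : Int) + (k : Int) = ((i + 1 + k : Nat) : Int) by push_cast; ring]
            rw [Int.toNat_natCast]
            dsimp only
            rw [PySem.List.slice_natCast, Nat.add_sub_cancel_left, ← hl]
            conv_rhs => rw [hsplit]
            rw [pvRunB_group (l.take k) hgsnotin [] parts (l.drop (k + 1))]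
            by_cases hgs : l.take k = []
            · rw [if_pos hgs]
              simp [hgs, pvOutB]
            · rw [if_neg hgs]
              by_cases hany : (l.take k).any (fun c => !pvIsAB c) = true
              · rw [if_pos hany, if_pos hany]; rfl
              · rw [if_neg hany, if_neg hany]
                rw [if_neg (show ¬([] = [] ∧ List.take k l = []) from fun hcon => hgs hcon.2)]
                rw [List.nil_append]
                have hrest2 : l.drop (k + 1) = s.drop (i + 1 + k + 1) := by
                  rw [hl, List.drop_drop]; congr 1
                rw [hrest2]
                rw [show ((i + 1 + k : Nat) : Int) + 1 = ((i + 1 + k + 1 : Nat) : Int) by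
                  push_cast; ring]
                have hlen : l.length = s.length - (i + 1) := by rw [hl, List.length_drop]
                have hph := pvDigitsPhase s fuel (i + 1 + k + 1) parts
                  (PySem.Chars.upper (l.take k)) (by omega) ih (by omega)
                exact hph
        · rw [if_neg hpar]
          conv_rhs => rw [hdrop]
          rw [show pvRunB (s[i] :: s.drop (i + 1)) ⟨parts, none, [], none⟩ = none by
            show (match pvStepB ⟨parts, none, [], none⟩ s[i] with
                  | none => none | some st' => pvRunB (s.drop (i + 1)) st') = _
            rw [show pvStepB ⟨parts, none, [], none⟩ s[i] = none by
              simp only [pvStepB, hab, Bool.false_eq_true, if_false]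
              split_ifs <;> rfl]]
          rfl
    · have hieq : i = s.length := by omega
      rw [pvLoopA, if_neg h, hieq, List.drop_length]
      simp [pvRunB, pvOutB, pvFlushB]

-- the two function tails agree on the preprocessed string
theorem pvFinal (s : List Char) (d : String) :
    (if s = [] then d
     else match pvLoopA s (s.length + 1) 0 [] with
          | none => d
          | some parts => if parts.flatten = [] then d else String.mk parts.flatten) =
    (if s = [] then d
     else match pvRunB s ⟨[], none, [], none⟩ with
          | none => d
          | some st =>
            if st.group.isSome then d
            else match pvFlushB st.parts st.pending st.digits with
                 | none => d
                 | some parts => if parts.flatten = [] then d else String.mk parts.flatten) := by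
  by_cases hs : s = []
  · rw [if_pos hs, if_pos hs]
  · rw [if_neg hs, if_neg hs]
    have hm := pvMain s (s.length + 1) 0 [] (by omega) (by omega)
    rw [List.drop_zero] at hm
    rw [hm]
    cases hr : pvRunB s ⟨[], none, [], none⟩ with
    | none => rfl
    | some st =>
      simp only [pvOutB]
      by_cases hg : st.group.isSome = true
      · rw [if_pos hg, if_pos hg]
      · rw [if_neg hg, if_neg hg]

-- ===== VERDICT (by name: the statement is the Claim_ definition above) =====
theorem decode_sequence_token_py_spec : Claim_equal_decode_sequence_token_py := by
  intro tok default_seq _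
  show decode_sequence_token_py tok default_seq = decode_sequence_token_py_alt tok default_seq
  unfold decode_sequence_token_py decode_sequence_token_py_alt
  exact pvFinal _ default_seq
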